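-- pv_equiv track=rewrite | github.com/Procrat/typy | examples/davit/evaluatie/luck.py | prijs
-- ===== SOURCE A (Python) =====
-- def spelbord(reeks,schermen=1):
--     if(len(reeks)%schermen != 0):
--         raise AssertionError('ongeldig spelbord')
--     return [list(reeks[start:start+schermen]) for start in range(0,len(reeks),schermen)]
--
-- def prijs(patroon,stappen,prijzen,start=0,schermen=1):
--     bord = spelbord(prijzen,schermen)
--     som = sum(patroon)
--     som *= stappen//len(patroon)
--     scherm = stappen%schermen
--     for i in range(stappen%len(patroon)):
--         som += patroon[i]
--     return bord[(start+som)%len(bord)][scherm]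
-- ===== SOURCE B (Python) =====
-- def prijs(patroon, stappen, prijzen, start=0, schermen=1):
--     if len(prijzen) % schermen != 0:
--         raise AssertionError('ongeldig spelbord')
--     q, r = divmod(stappen, len(patroon))
--     som = sum(patroon) * q + sum(patroon[:r])
--     nrows = len(prijzen) // schermen
--     return prijzen[(start + som) % nrows * schermen + stappen % schermen]
-- ===== Notes on version B (the rewrite author's own statement) =====
-- stated objective: simpler
-- what changed: B never materializes the 2D board: it validates divisibility, folds the cyclic pattern sum into a closed prefix-sum via divmod, and reads the answer with one flat index row*schermen + stappen%schermen into the original list.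
import Mathlib
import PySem

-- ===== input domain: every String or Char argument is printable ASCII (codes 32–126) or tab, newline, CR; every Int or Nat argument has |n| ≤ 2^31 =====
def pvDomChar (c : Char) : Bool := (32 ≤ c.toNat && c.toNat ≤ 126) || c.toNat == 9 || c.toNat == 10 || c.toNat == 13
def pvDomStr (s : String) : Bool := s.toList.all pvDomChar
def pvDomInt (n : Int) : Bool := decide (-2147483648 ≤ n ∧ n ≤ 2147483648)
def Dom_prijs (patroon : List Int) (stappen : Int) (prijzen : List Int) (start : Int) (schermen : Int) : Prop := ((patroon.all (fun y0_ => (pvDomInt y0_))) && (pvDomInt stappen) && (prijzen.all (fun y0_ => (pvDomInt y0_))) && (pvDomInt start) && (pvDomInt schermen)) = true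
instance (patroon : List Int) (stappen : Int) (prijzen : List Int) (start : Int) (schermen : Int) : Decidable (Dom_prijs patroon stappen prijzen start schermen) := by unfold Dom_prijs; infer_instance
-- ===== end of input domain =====

-- B avoids building the 2D board: one flat index into prijzen and a closed prefix sum (objective: simpler).

-- ===== PORT A =====
def spelbordA (reeks : List Int) (schermen : Int) : List (List Int) :=
  (PySem.List.pyRange 0 reeks.length schermen).map
    (fun s => PySem.List.slice reeks (some s) (some (s + schermen)))

def prijs (patroon : List Int) (stappen : Int) (prijzen : List Int) (start : Int) (schermen : Int) : Int :=
  let bord := spelbordA prijzen schermen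
  let som0 := patroon.sum
  let som1 := som0 * PySem.Int.floordiv stappen (patroon.length : Int)
  let scherm := PySem.Int.mod stappen schermen
  let som := (PySem.List.pyRange 0 (PySem.Int.mod stappen (patroon.length : Int)) 1).foldl
      (fun s i => s + PySem.List.pyGetD patroon i 0) som1
  PySem.List.pyGetD (PySem.List.pyGetD bord (PySem.Int.mod (start + som) (bord.length : Int)) []) scherm 0

-- ===== PORT B =====
def prijs_alt (patroon : List Int) (stappen : Int) (prijzen : List Int) (start : Int) (schermen : Int) : Int :=
  let qr := (PySem.Int.divmod? stappen (patroon.length : Int)).getD (0, 0)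
  let som := patroon.sum * qr.1 + (PySem.List.slice patroon (some 0) (some qr.2)).sum
  let nrows := PySem.Int.floordiv (prijzen.length : Int) schermen
  PySem.List.pyGetD prijzen
    (PySem.Int.mod (start + som) nrows * schermen + PySem.Int.mod stappen schermen) 0

-- ===== PRECONDITION & SPEC =====
-- Pre_ excludes exactly the inputs on which A raises: schermen ≤ 0 or empty patroon or empty
-- prijzen (ZeroDivisionError), and len(prijzen) not a multiple of schermen (AssertionError).
def Pre_prijs (patroon : List Int) (stappen : Int) (prijzen : List Int) (start : Int) (schermen : Int) : Prop :=
  0 < schermen ∧ patroon ≠ [] ∧ prijzen ≠ [] ∧ PySem.Int.mod (prijzen.length : Int) schermen = 0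
instance (patroon : List Int) (stappen : Int) (prijzen : List Int) (start : Int) (schermen : Int) : Decidable (Pre_prijs patroon stappen prijzen start schermen) := by unfold Pre_prijs; infer_instance

def pvWitness_prijs : List Int × Int × List Int × Int × Int := ([3, -1], 5, [10, 20, 30, 40], 1, 2)

def Spec_prijs (patroon : List Int) (stappen : Int) (prijzen : List Int) (start : Int) (schermen : Int) (out : Int) : Prop := out = prijs_alt patroon stappen prijzen start schermen
instance (patroon : List Int) (stappen : Int) (prijzen : List Int) (start : Int) (schermen : Int) (out : Int) : Decidable (Spec_prijs patroon stappen prijzen start schermen out) := by unfold Spec_prijs; infer_instance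

-- ===== CLAIM (what is proved, stated in full; the proofs are below) =====
def Claim_equal_prijs : Prop := ∀ (patroon : List Int) (stappen : Int) (prijzen : List Int) (start : Int) (schermen : Int), Dom_prijs patroon stappen prijzen start schermen → Pre_prijs patroon stappen prijzen start schermen → Spec_prijs patroon stappen prijzen start schermen (prijs patroon stappen prijzen start schermen)

-- ===== LEMMAS AND PROOFS =====

theorem sum_range_getD (xs : List Int) (m : Nat) (hm : m ≤ xs.length) (init : Int) :
    (List.range m).foldl (fun s k => s + xs.getD k 0) init = init + (xs.take m).sum := by
  induction m generalizing init with
  | zero => simp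
  | succ m ih =>
      rw [List.range_succ, List.foldl_append, ih (by omega)]
      have hlt : m < xs.length := by omega
      have htk : xs.take (m+1) = xs.take m ++ [xs[m]] := by
        rw [List.take_add_one]
        simp [List.getElem?_eq_getElem hlt]
      rw [htk]
      simp only [List.foldl_cons, List.foldl_nil, List.sum_append, List.sum_cons,
        List.sum_nil, List.getD_eq_getElem xs 0 hlt]
      ring

-- ===== VERDICT (by name: the statement is the Claim_ definition above) =====
theorem prijs_spec : Claim_equal_prijs := by
  intro patroon stappen prijzen start schermen _ hpre
  obtain ⟨hs, hp, hq, hdvd⟩ := hpre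
  simp only [Spec_prijs, prijs, prijs_alt, spelbordA]
  have hL : 0 < patroon.length := List.length_pos_iff.mpr hp
  have hN : 0 < prijzen.length := List.length_pos_iff.mpr hq
  rw [PySem.Int.mod_eq_zero_iff_dvd] at hdvd
  -- sums agree
  have hdm : (PySem.Int.divmod? stappen (patroon.length : Int)).getD (0, 0)
      = (PySem.Int.floordiv stappen (patroon.length : Int),
         PySem.Int.mod stappen (patroon.length : Int)) := by
    simp [PySem.Int.divmod?, hp, PySem.Int.floordiv, PySem.Int.mod]
  set r := PySem.Int.mod stappen (patroon.length : Int) with hr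
  have hr0 : 0 ≤ r := PySem.Int.mod_nonneg _ (by exact_mod_cast hL)
  have hrlt : r < (patroon.length : Int) := PySem.Int.mod_lt _ (by exact_mod_cast hL)
  have hsum : (PySem.List.pyRange 0 r 1).foldl
      (fun s i => s + PySem.List.pyGetD patroon i 0)
      (patroon.sum * PySem.Int.floordiv stappen (patroon.length : Int))
      = patroon.sum * PySem.Int.floordiv stappen (patroon.length : Int)
        + (patroon.take r.toNat).sum := by
    rw [PySem.List.pyRange_one, List.foldl_map]
    simp only [zero_add, Int.sub_zero, PySem.List.pyGetD_natCast]
    rw [sum_range_getD _ _ (by omega)]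
  rw [hdm, hsum]
  simp only []
  have hslice : PySem.List.slice patroon (some 0) (some r) = patroon.take r.toNat := by
    rw [PySem.List.slice_zero_start, PySem.List.slice_to _ hr0]
  rw [hslice]
  set som := patroon.sum * PySem.Int.floordiv stappen (patroon.length : Int)
    + (patroon.take r.toNat).sum with hsom
  -- board geometry
  obtain ⟨m, hm⟩ := hdvd
  have hm0 : 0 < m := by
    by_contra h
    have h' : m ≤ 0 := by omega
    nlinarith [hm, hN, hs]
  -- bord length
  have hbordlen : ((PySem.List.pyRange 0 (prijzen.length : Int) schermen).map
      (fun s => PySem.List.slice prijzen (some s) (some (s + schermen)))).length = m.toNat := by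
    rw [List.length_map, PySem.List.pyRange_of_pos _ _ hs, List.length_map,
        List.length_range]
    have : (0 : Int) < (prijzen.length : Int) := by exact_mod_cast hN
    rw [if_pos (by omega)]
    have : ((prijzen.length : Int) - 0 + schermen - 1) / schermen = m := by
      rw [hm]
      have h1 : schermen * m - 0 + schermen - 1 = schermen - 1 + m * schermen := by ring
      rw [h1, Int.add_mul_ediv_right _ _ (by omega : schermen ≠ 0),
          Int.ediv_eq_zero_of_lt (by omega) (by omega)]
      omega
    rw [this]
  set bord := (PySem.List.pyRange 0 (prijzen.length : Int) schermen).map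
      (fun s => PySem.List.slice prijzen (some s) (some (s + schermen))) with hbord
  set k := PySem.Int.mod (start + som) (bord.length : Int) with hk
  have hmlen : (bord.length : Int) = m := by rw [hbordlen]; omega
  have hk0 : 0 ≤ k := PySem.Int.mod_nonneg _ (by omega)
  have hklt : k < m := by rw [hk, ← hmlen]; exact PySem.Int.mod_lt _ (by omega)
  -- the row
  have hrow : PySem.List.pyGetD bord k [] =
      (prijzen.drop (k.toNat * schermen.toNat)).take schermen.toNat := by
    rw [PySem.List.pyGetD_eq_getElem _ _ hk0 (by omega)]
    simp only [hbord, PySem.List.pyRange_of_pos _ _ hs, List.getElem_map, List.getElem_range]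
    have harg : (0 : Int) + schermen * (k.toNat : Int) = (↑(k.toNat * schermen.toNat) : Int) := by
      push_cast; have : (k.toNat : Int) = k := by omega
      have hsn : (schermen.toNat : Int) = schermen := by omega
      rw [this, hsn]; ring
    rw [harg]
    have harg2 : (↑(k.toNat * schermen.toNat) : Int) + schermen
        = (↑(k.toNat * schermen.toNat + schermen.toNat) : Int) := by
      push_cast; omega
    rw [harg2, PySem.List.slice_natCast, Nat.add_sub_cancel_left]
  rw [hrow]
  -- row length is exactly schermen
  have hlen_prij : prijzen.length = m.toNat * schermen.toNat := by
    have : (prijzen.length : Int) = m * schermen := by rw [hm]; ring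
    have h2 : m * schermen = ((m.toNat * schermen.toNat : Nat) : Int) := by
      push_cast; rw [(by omega : (m.toNat : Int) = m), (by omega : (schermen.toNat : Int) = schermen)]
    omega
  set scherm := PySem.Int.mod stappen schermen with hschd
  have hsch0 : 0 ≤ scherm := PySem.Int.mod_nonneg _ hs
  have hschlt : scherm < schermen := PySem.Int.mod_lt _ hs
  have hrowlen : ((prijzen.drop (k.toNat * schermen.toNat)).take schermen.toNat).length
      = schermen.toNat := by
    rw [List.length_take, List.length_drop, hlen_prij]
    have hk' : k.toNat + 1 ≤ m.toNat := by omega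
    have h2 : (k.toNat + 1) * schermen.toNat ≤ m.toNat * schermen.toNat :=
      Nat.mul_le_mul_right _ hk'
    rw [Nat.add_mul, one_mul] at h2
    omega
  -- A's value as element of prijzen
  have hA : PySem.List.pyGetD ((prijzen.drop (k.toNat * schermen.toNat)).take schermen.toNat) scherm 0
      = PySem.List.pyGetD prijzen (k * schermen + scherm) 0 := by
    rw [PySem.List.pyGetD_eq_getElem _ _ hsch0 (by rw [hrowlen]; omega)]
    rw [PySem.List.pyGetD_eq_getElem _ _ (by positivity) (by
      have : (k + 1) * schermen ≤ m * schermen := by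
        apply mul_le_mul_of_nonneg_right _ (by omega)
        omega
      have hml : ((prijzen.length : Int)) = m * schermen := by rw [hm]; ring
      nlinarith)]
    rw [List.getElem_take, List.getElem_drop]
    congr 1
    have hprod : ((k.toNat * schermen.toNat : Nat) : Int) = k * schermen := by
      push_cast
      rw [(by omega : (k.toNat : Int) = k), (by omega : (schermen.toNat : Int) = schermen)]
    omega
  rw [hA]
  -- B's index equals A's index
  have hnr : PySem.Int.floordiv (prijzen.length : Int) schermen = m := by
    rw [hm, PySem.Int.floordiv_eq_ediv_of_pos hs, Int.mul_ediv_cancel_left _ (by omega)]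
  rw [hnr, ← hmlen]
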